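-- pv_equiv track=rewrite | github.com/varadrz/60-Days-of-Coding-DSA-Real-World-Projects | Day-19-Price Optimization Tool/Day-19.py | find_optimal_price
-- ===== SOURCE A (Python) =====
-- def is_affordable(prices, budget, max_price):
--     total = 0
--     for price in prices:
--         total += min(price, max_price)
--     return total <= budget
--
-- def find_optimal_price(prices, budget):
--     low, high = 0, max(prices)
--     optimal_price = 0
--
--     while low <= high:
--         mid = (low + high) // 2
--
--         if is_affordable(prices, budget, mid):
--             optimal_price = mid
--             low = mid + 1
--         else:
--             high = mid - 1
--
--     return optimal_price
-- ===== SOURCE B (Python) =====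
-- def find_optimal_price(prices, budget):
--     # Sort ascending and walk the piecewise-linear capped-total function:
--     # within the segment where i prices lie below the cap, capped total is
--     # pre + (n - i) * cap; solve that segment directly with one floor division.
--     ps = sorted(prices)
--     n = len(ps)
--     t = ps[-1]
--     pre = 0
--     for i, p in enumerate(ps):
--         cand = (budget - pre) // (n - i)
--         if cand < p:
--             t = cand
--             break
--         pre += p
--     return t if t > 0 else 0
-- ===== Notes on version B (the rewrite author's own statement) =====
-- stated objective: faster
-- what changed: Replaces the binary search over the price range (each step rescanning all prices) by sort + one pass over the piecewise-linear capped-total function, solving the right linear segment with a single floor division.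
import Mathlib
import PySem

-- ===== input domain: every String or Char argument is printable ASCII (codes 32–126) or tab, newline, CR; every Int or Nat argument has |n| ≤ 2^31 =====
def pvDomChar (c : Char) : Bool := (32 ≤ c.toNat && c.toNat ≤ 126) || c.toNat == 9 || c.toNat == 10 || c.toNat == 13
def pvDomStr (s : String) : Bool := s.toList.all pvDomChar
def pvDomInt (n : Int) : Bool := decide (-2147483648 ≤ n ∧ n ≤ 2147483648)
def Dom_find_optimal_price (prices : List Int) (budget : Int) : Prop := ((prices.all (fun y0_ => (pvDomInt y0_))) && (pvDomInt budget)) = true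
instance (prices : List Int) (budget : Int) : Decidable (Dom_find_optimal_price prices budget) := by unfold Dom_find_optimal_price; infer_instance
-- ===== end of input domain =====

-- B replaces A's binary search over the price range by sort + one linear pass
-- over the piecewise-linear capped-total function (objective: faster).

-- ===== PORT A =====
def is_affordable (prices : List Int) (budget : Int) (max_price : Int) : Bool :=
  decide ((prices.foldl (fun total price => total + min price max_price) 0) ≤ budget)

-- fuel = interval length + 1, enough for the while-loop to reach low > high (totality guard only)
def aLoop (prices : List Int) (budget : Int) : Nat → Int → Int → Int → Int
  | 0, _, _, optimal_price => optimal_price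
  | fuel + 1, low, high, optimal_price =>
    if low ≤ high then
      let mid := PySem.Int.floordiv (low + high) 2
      if is_affordable prices budget mid then
        aLoop prices budget fuel (mid + 1) high mid
      else
        aLoop prices budget fuel low (mid - 1) optimal_price
    else optimal_price

-- max(prices) raises on an empty list; Pre_ excludes it, .getD 0 is unreachable on Pre_.
def find_optimal_price (prices : List Int) (budget : Int) : Int :=
  let high := (PySem.List.max? prices (fun x => x)).getD 0
  aLoop prices budget ((high + 1).toNat + 1) 0 high 0

-- ===== PORT B =====
def bLoop (budget : Int) : List Int → Int → Int → Int → Option Int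
  | [], _, _, _ => none
  | p :: rest, n, i, pre =>
    let cand := PySem.Int.floordiv (budget - pre) (n - i)
    if cand < p then some cand else bLoop budget rest n (i + 1) (pre + p)

-- ps[-1] raises on an empty list; Pre_ excludes it, .getD 0 is unreachable on Pre_.
def find_optimal_price_alt (prices : List Int) (budget : Int) : Int :=
  let ps := PySem.List.sorted prices (fun x => x) false
  let n : Int := ps.length
  let t0 := (PySem.List.pyGet? ps (-1)).getD 0
  let t := (bLoop budget ps n 0 0).getD t0
  if t > 0 then t else 0

-- ===== PRECONDITION & SPEC =====
-- Pre_ excludes only the empty list, on which Python A raises ValueError (max of empty).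
def Pre_find_optimal_price (prices : List Int) (budget : Int) : Prop := prices ≠ []
instance (prices : List Int) (budget : Int) : Decidable (Pre_find_optimal_price prices budget) := by unfold Pre_find_optimal_price; infer_instance
def pvWitness_find_optimal_price : List Int × Int := ([3, 7], 8)

def Spec_find_optimal_price (prices : List Int) (budget : Int) (out : Int) : Prop := out = find_optimal_price_alt prices budget
instance (prices : List Int) (budget : Int) (out : Int) : Decidable (Spec_find_optimal_price prices budget out) := by unfold Spec_find_optimal_price; infer_instance

-- ===== CLAIM (what is proved, stated in full; the proofs are below) =====
def Claim_equal_find_optimal_price : Prop := ∀ (prices : List Int) (budget : Int), Dom_find_optimal_price prices budget → Pre_find_optimal_price prices budget → Spec_find_optimal_price prices budget (find_optimal_price prices budget)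

-- ===== LEMMAS AND PROOFS =====

-- g l m = the capped total sum(min(p, m) for p in l)
def gTot (l : List Int) (m : Int) : Int := (l.map (fun p => min p m)).sum

lemma foldl_gTot (l : List Int) (m : Int) : ∀ t : Int,
    l.foldl (fun total price => total + min price m) t = t + gTot l m := by
  induction l with
  | nil => intro t; simp [gTot]
  | cons p rest ih => intro t; simp [gTot, List.foldl, ih, List.map, List.sum_cons]; ring

lemma gTot_mono (l : List Int) {m m' : Int} (h : m ≤ m') : gTot l m ≤ gTot l m' := by
  induction l with
  | nil => simp [gTot]
  | cons p rest ih =>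
    simp only [gTot, List.map, List.sum_cons] at *
    have : min p m ≤ min p m' := by omega
    omega

lemma gTot_perm {l l' : List Int} (h : l.Perm l') (m : Int) : gTot l m = gTot l' m :=
  List.Perm.sum_eq (h.map _)

lemma gTot_append (a b : List Int) (m : Int) : gTot (a ++ b) m = gTot a m + gTot b m := by
  simp [gTot]

lemma gTot_of_le (l : List Int) (m : Int) (h : ∀ d ∈ l, d ≤ m) : gTot l m = l.sum := by
  induction l with
  | nil => simp [gTot]
  | cons p rest ih =>
    simp only [gTot, List.map, List.sum_cons] at *
    have hp : p ≤ m := h p (by simp)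
    have := ih (fun d hd => h d (by simp [hd]))
    omega

lemma gTot_of_ge (l : List Int) (m : Int) (h : ∀ q ∈ l, m ≤ q) : gTot l m = l.length * m := by
  induction l with
  | nil => simp [gTot]
  | cons p rest ih =>
    simp only [gTot, List.map, List.sum_cons, List.length_cons] at *
    have hp : m ≤ p := h p (by simp)
    rw [ih (fun q hq => h q (by simp [hq])), min_eq_right hp]
    push_cast
    ring

lemma gTot_le_sum (l : List Int) (m : Int) : gTot l m ≤ l.sum := by
  induction l with
  | nil => simp [gTot]
  | cons p rest ih =>
    simp only [gTot, List.map, List.sum_cons] at *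
    have : min p m ≤ p := min_le_left _ _
    omega

-- ===== B-side characterisation =====

lemma bLoop_spec (budget : Int) (ps : List Int) (hsort : ps.Pairwise (· ≤ ·)) :
    ∀ (l done : List Int) (pre i : Int),
      ps = done ++ l →
      pre = done.sum →
      ((ps.length : Int) - i = l.length) →
      (∀ d ∈ done, pre + (l.length : Int) * d ≤ budget) →
      (match bLoop budget l (ps.length : Int) i pre with
       | some c => gTot ps c ≤ budget ∧ (∀ m, c < m → budget < gTot ps m) ∧ ∃ q ∈ ps, c < q
       | none => ∀ d ∈ ps, gTot ps d ≤ budget) := by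
  intro l
  induction l with
  | nil =>
    intro done pre i heq hpre _ hinv
    simp only [bLoop]
    intro d hd
    have hd' : d ∈ done := by simpa [heq] using hd
    have h1 := hinv d hd'
    simp only [List.length_nil, Nat.cast_zero, zero_mul, add_zero] at h1
    have h2 := gTot_le_sum ps d
    have h3 : ps.sum = done.sum := by simp [heq]
    omega
  | cons p rest ih =>
    intro done pre i heq hpre hlen hinv
    have hk : (ps.length : Int) - i = (rest.length : Int) + 1 := by
      simpa using hlen
    simp only [bLoop]
    set k := (ps.length : Int) - i with hkdef
    have hkpos : (0 : Int) < k := by omega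
    have hklen : ((p :: rest).length : Int) = k := by push_cast; omega
    have hinv' : ∀ d ∈ done, pre + k * d ≤ budget := by
      intro d hd; have := hinv d hd; rw [hklen] at this; exact this
    -- order facts
    have hpw := hsort
    rw [heq, List.pairwise_append] at hpw
    have hdp : ∀ d ∈ done, d ≤ p := fun d hd => hpw.2.2 d hd p (by simp)
    have hpr : ∀ q ∈ rest, p ≤ q := by
      have := hpw.2.1
      exact fun q hq => (List.pairwise_cons.mp this).1 q hq
    set cand := PySem.Int.floordiv (budget - pre) k with hcand
    -- segment formula: for done ≤ m ≤ p, gTot ps m = pre + k * m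
    have hseg : ∀ m : Int, (∀ d ∈ done, d ≤ m) → m ≤ p →
        gTot ps m = pre + k * m := by
      intro m hdm hmp
      rw [heq, gTot_append]
      have h1 : gTot done m = done.sum := gTot_of_le _ _ hdm
      have h2 : gTot (p :: rest) m = ((p :: rest).length : Int) * m :=
        gTot_of_ge _ _ (by
          intro q hq
          rcases List.mem_cons.mp hq with rfl | hq
          · exact hmp
          · exact le_trans hmp (hpr q hq))
      rw [h1, h2, hpre, hklen]
    by_cases hc : cand < p
    · simp only [if_pos hc]
      -- all done elements are ≤ cand
      have hdc : ∀ d ∈ done, d ≤ cand := by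
        intro d hd
        rw [hcand, PySem.Int.le_floordiv_iff_mul_le hkpos]
        have := hinv' d hd
        nlinarith [this]
      refine ⟨?_, ?_, p, by simp [heq], hc⟩
      · rw [hseg cand hdc (by omega)]
        have hle : cand * k ≤ budget - pre := by
          conv_lhs => rw [hcand]
          exact (PySem.Int.le_floordiv_iff_mul_le hkpos).mp (by rw [← hcand])
        nlinarith [hle]
      · intro m hm
        by_cases hmp : m ≤ p
        · rw [hseg m (fun d hd => le_trans (hdc d hd) (le_of_lt hm)) hmp]
          have hlt : budget - pre < m * k := by
            rw [hcand] at hm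
            exact (PySem.Int.floordiv_lt_iff_lt_mul hkpos).mp hm
          nlinarith [hlt]
        · have hgp : budget < gTot ps p := by
            rw [hseg p hdp le_rfl]
            have hlt : budget - pre < p * k := by
              rw [hcand] at hc
              exact (PySem.Int.floordiv_lt_iff_lt_mul hkpos).mp hc
            nlinarith [hlt]
          exact lt_of_lt_of_le hgp (gTot_mono ps (by omega))
    · simp only [if_neg hc]
      have hpk : p * k ≤ budget - pre := by
        have hpc : p ≤ cand := by omega
        rw [hcand] at hpc
        exact (PySem.Int.le_floordiv_iff_mul_le hkpos).mp hpc
      have := ih (done ++ [p]) (pre + p) (i + 1)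
        (by simp [heq])
        (by simp [hpre])
        (by push_cast; omega)
        (by
          intro d hd
          have hdp' : d ≤ p := by
            rcases List.mem_append.mp hd with hd | hd
            · exact hdp d hd
            · simp at hd; omega
          have hrl : (0 : Int) ≤ (rest.length : Int) := Int.natCast_nonneg _
          have h1 : (rest.length : Int) * d ≤ (rest.length : Int) * p := by
            exact mul_le_mul_of_nonneg_left hdp' hrl
          have h2 : pre + p + (rest.length : Int) * p ≤ budget := by
            have hke : k = (rest.length : Int) + 1 := by omega
            rw [hke] at hpk
            have hexp : p * ((rest.length : Int) + 1) = (rest.length : Int) * p + p := by ring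
            linarith [hpk, hexp]
          omega)
      simpa using this

-- last element of a ≤-sorted list bounds all elements
lemma pairwise_le_last : ∀ (l : List Int) (x : Int), l.Pairwise (· ≤ ·) → x ∈ l →
    ∀ z, l.getLast? = some z → x ≤ z := by
  intro l
  induction l with
  | nil => intro x _ hx; cases hx
  | cons a t ih =>
    intro x hpw hx z hz
    rcases List.pairwise_cons.mp hpw with ⟨ha, ht⟩
    cases t with
    | nil =>
      simp at hx hz
      omega
    | cons b t' =>
      rcases List.mem_cons.mp hx with rfl | hx
      · have hb : x ≤ b := ha b (by simp)
        have : b ≤ z := ih b ht (by simp) z (by simpa using hz)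
        omega
      · exact ih x ht hx z (by simpa using hz)

-- The bundle of facts about B's result used to pin down A's binary search.
lemma alt_bundle (prices : List Int) (budget : Int) (hne : prices ≠ []) (M : Int)
    (hM : PySem.List.max? prices (fun x => x) = some M) :
    let r := find_optimal_price_alt prices budget
    0 ≤ r ∧ r ≤ max M 0 ∧ (r ≠ 0 → gTot prices r ≤ budget) ∧
      (∀ m, m ≤ M → gTot prices m ≤ budget → m ≤ r) := by
  intro r
  set ps := PySem.List.sorted prices (fun x => x) false with hps
  have hperm : ps.Perm prices := PySem.List.sorted_perm ..
  have hsort : ps.Pairwise (· ≤ ·) := by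
    have := PySem.List.sorted_pairwise (xs := prices) (key := fun x => x)
    simpa [hps] using this
  have hpsne : ps ≠ [] := by
    intro h; exact hne (List.Perm.nil_eq (h ▸ hperm)).symm
  -- ps[-1] = M (the maximum value)
  obtain ⟨z, hz⟩ : ∃ z, ps.getLast? = some z := by
    cases hlast : ps.getLast? with
    | none => exact absurd (List.getLast?_eq_none_iff.mp hlast) hpsne
    | some z => exact ⟨z, rfl⟩
  have hzM : z = M := by
    have hzmem : z ∈ ps := List.mem_of_getLast? hz
    have h1 : z ≤ M := by
      have := PySem.List.max?_isMax (xs := prices) (key := fun x => x) hM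
      exact this z (hperm.mem_iff.mp hzmem)
    have h2 : M ≤ z := by
      have hMmem : M ∈ ps := hperm.mem_iff.mpr (PySem.List.max?_mem hM)
      exact pairwise_le_last ps M hsort hMmem z hz
    omega
  have hget : (PySem.List.pyGet? ps (-1)).getD 0 = M := by
    have : PySem.List.pyGet? ps (-1) = ps.getLast? := by
      simp [PySem.List.pyGet?_neg_one]
    rw [this, hz, hzM]
    rfl
  have hgTot : ∀ m, gTot ps m = gTot prices m := fun m => gTot_perm hperm m
  have hMmax : ∀ x ∈ ps, x ≤ M := by
    intro x hx
    have := PySem.List.max?_isMax (xs := prices) (key := fun x => x) hM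
    exact this x (hperm.mem_iff.mp hx)
  have hspec := bLoop_spec budget ps hsort ps [] 0 0 (by simp) (by simp) (by simp) (by simp)
  have hr : r = (if ((bLoop budget ps (ps.length : Int) 0 0).getD M) > 0
      then (bLoop budget ps (ps.length : Int) 0 0).getD M else 0) := by
    show find_optimal_price_alt prices budget = _
    rw [find_optimal_price_alt]
    simp only [← hps, hget]
  cases hb : bLoop budget ps (ps.length : Int) 0 0 with
  | some c =>
    rw [hb] at hspec hr
    simp only [Option.getD_some] at hspec hr
    obtain ⟨hc1, hc2, q, hq, hcq⟩ := hspec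
    have hcM : c < M := lt_of_lt_of_le hcq (hMmax q hq)
    refine ⟨by rw [hr]; split <;> omega, ?_, ?_, ?_⟩
    · rw [hr]
      split <;> omega
    · intro hrne
      by_cases hpos : c > 0
      · rw [hr, if_pos hpos, ← hgTot]; exact hc1
      · rw [hr, if_neg hpos] at hrne; exact absurd rfl hrne
    · intro m hmM hfeas
      have : ¬ (c < m) := by
        intro hcm
        have := hc2 m hcm
        rw [hgTot] at this
        omega
      rw [hr]
      split <;> omega
  | none =>
    rw [hb] at hspec hr
    simp only [Option.getD_none] at hr
    have hMfeas : gTot ps M ≤ budget := by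
      have hMmem : M ∈ ps := hperm.mem_iff.mpr (PySem.List.max?_mem hM)
      exact hspec M hMmem
    refine ⟨by rw [hr]; split <;> omega, by rw [hr]; split <;> omega, ?_, ?_⟩
    · intro hrne
      by_cases hpos : M > 0
      · rw [hr, if_pos hpos, ← hgTot]; exact hMfeas
      · rw [hr, if_neg hpos] at hrne; exact absurd rfl hrne
    · intro m hmM _
      rw [hr]
      split <;> omega

-- ===== A-side: the binary search computes the same value =====

lemma aLoop_eq (prices : List Int) (budget : Int) (r M : Int)
    (hr0 : 0 ≤ r) (hrM : r ≤ max M 0)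
    (hrf : r ≠ 0 → gTot prices r ≤ budget)
    (hmax : ∀ m, m ≤ M → gTot prices m ≤ budget → m ≤ r) :
    ∀ (n : ℕ) (low high : Int), (high + 1 - low).toNat ≤ n →
      0 ≤ low → low ≤ high + 1 → high ≤ M →
      (∀ m, 0 ≤ m → m < low → gTot prices m ≤ budget) →
      (∀ m, high < m → m ≤ M → budget < gTot prices m) →
      aLoop prices budget n low high (max (low - 1) 0) = r := by
  intro n
  induction n with
  | zero =>
    intro low high hfuel hlow0 hlh hhM hlower hupper
    rw [aLoop]
    -- low = high + 1
    have hle : low = high + 1 := by omega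
    by_cases hh : 0 ≤ high
    · have hfeas : gTot prices high ≤ budget := hlower high hh (by omega)
      have h1 : high ≤ r := hmax high (by omega) hfeas
      have h2 : r ≤ high := by
        by_contra hc0
        have hc : high < r := by omega
        have hrne : r ≠ 0 := by omega
        have := hrf hrne
        have hrM' : r ≤ M := by
          rcases max_cases M 0 with ⟨he, _⟩ | ⟨he, hle'⟩ <;> omega
        have := hupper r hc hrM'
        omega
      omega
    · -- high < 0, so low = 0 and high = -1
      have : low = 0 ∧ high = -1 := by omega
      obtain ⟨rfl, rfl⟩ := this
      have h2 : r = 0 := by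
        by_contra hc
        have hrpos : 0 < r := by omega
        have := hrf hc
        have hrM' : r ≤ M := by
          rcases max_cases M 0 with ⟨he, _⟩ | ⟨he, hle'⟩ <;> omega
        have := hupper r (by omega) hrM'
        omega
      simp [h2]
  | succ n ih =>
    intro low high hfuel hlow0 hlh hhM hlower hupper
    by_cases hcond : low ≤ high
    · rw [aLoop, if_pos hcond]
      have hmid := PySem.Int.floordiv_two_mid_bounds (lo := low) (hi := high) hcond
      set mid := PySem.Int.floordiv (low + high) 2 with hmiddef
      have haff : is_affordable prices budget mid = decide (gTot prices mid ≤ budget) := by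
        rw [is_affordable, foldl_gTot]
        simp
      by_cases hf : gTot prices mid ≤ budget
      · simp only [haff, decide_eq_true hf, if_true]
        have hmid0 : max (mid + 1 - 1) 0 = mid := by omega
        have hrec := ih (mid + 1) high (by omega) (by omega) (by omega) hhM
          (by
            intro m hm0 hmlt
            by_cases hmm : m < low
            · exact hlower m hm0 hmm
            · exact le_trans (gTot_mono prices (by omega : m ≤ mid)) hf)
          hupper
        rw [hmid0] at hrec
        exact hrec
      · simp only [haff, decide_eq_false hf, Bool.false_eq_true, if_false]
        apply ih
        · omega
        · omega
        · omega
        · omega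
        · exact hlower
        · intro m hm hmM
          by_cases hmm : high < m
          · exact hupper m hmm hmM
          · exact lt_of_lt_of_le (by omega : budget < gTot prices mid)
              (gTot_mono prices (by omega : mid ≤ m))
    · rw [aLoop, if_neg hcond]
      -- same as the zero case exit
      have hle : low = high + 1 := by omega
      by_cases hh : 0 ≤ high
      · have hfeas : gTot prices high ≤ budget := hlower high hh (by omega)
        have h1 : high ≤ r := hmax high (by omega) hfeas
        have h2 : r ≤ high := by
          by_contra hc0
          have hc : high < r := by omega
          have hrne : r ≠ 0 := by omega
          have := hrf hrne
          have hrM' : r ≤ M := by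
            rcases max_cases M 0 with ⟨he, _⟩ | ⟨he, hle'⟩ <;> omega
          have := hupper r hc hrM'
          omega
        omega
      · have : low = 0 ∧ high = -1 := by omega
        obtain ⟨rfl, rfl⟩ := this
        have h2 : r = 0 := by
          by_contra hc
          have := hrf hc
          have hrM' : r ≤ M := by
            rcases max_cases M 0 with ⟨he, _⟩ | ⟨he, hle'⟩ <;> omega
          have := hupper r (by omega) hrM'
          omega
        simp [h2]

-- ===== VERDICT (by name: the statement is the Claim_ definition above) =====
theorem find_optimal_price_spec : Claim_equal_find_optimal_price := by
  intro prices budget _hdom hpre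
  unfold Spec_find_optimal_price
  obtain ⟨M, hM⟩ : ∃ M, PySem.List.max? prices (fun x => x) = some M := by
    cases h : PySem.List.max? prices (fun x => x) with
    | none => exact absurd ((PySem.List.max?_eq_none_iff (xs := prices) (key := fun x => x)).mp h) hpre
    | some M => exact ⟨M, rfl⟩
  obtain ⟨hr0, hrM, hrf, hmax⟩ := alt_bundle prices budget hpre M hM
  rw [find_optimal_price, hM]
  simp only [Option.getD_some]
  by_cases hM0 : 0 ≤ M
  · have h0 : (0 : Int) = max (0 - 1) 0 := by omega
    rw [h0]
    apply aLoop_eq prices budget _ M hr0 hrM hrf hmax ((M + 1).toNat + 1)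
    · omega
    · omega
    · omega
    · omega
    · intro m hm0 hm; omega
    · intro m hm hmM; omega
  · have hfz : (M + 1).toNat + 1 = 0 + 1 := by omega
    rw [hfz, aLoop, if_neg (by omega)]
    have : find_optimal_price_alt prices budget = 0 := by
      have := hrM
      rcases max_cases M 0 with ⟨he, _⟩ | ⟨he, _⟩ <;> omega
    omega
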